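-- pv_equiv track=rewrite | github.com/ohatipoglu/openvino_llm_studio | modules/dspy_enricher.py | _fuzzy_match_mode
-- ===== SOURCE A (Python) =====
-- DSPY_MODES = {
--     "ChainOfThought": "Karmaşık, analitik veya açıklama gerektiren sorular. Adım adım düşünme gerektirir.",
--     "ReAct":          "Güncel bilgi, haber, banka işlemi veya araştırma gerektiren sorular.",
--     "ProgramOfThought": "Matematik, hesaplama veya kod gerektiren sorular.",
--     "MultiChainComparison": "Karşılaştırma, eleştiri, avantaj/dezavantaj veya farklı bakış açısı isteyen sorular.",
--     "Summarize":      "Bir konuyu özetleme veya kısa açıklama isteyen sorular.",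
--     "Predict":        "Basit, kısa ve doğrudan yanıt gerektiren olgusal sorular.",
-- }
--
-- def _fuzzy_match_mode(raw: str) -> str:
--     raw_lower = raw.lower()
--     for mode in DSPY_MODES:
--         if mode.lower() in raw_lower or raw_lower in mode.lower():
--             return mode
--     for mode in DSPY_MODES:
--         for word in mode.lower().split():
--             if word in raw_lower:
--                 return mode
--     return "ChainOfThought"
-- ===== SOURCE B (Python) =====
-- DSPY_MODES = {
--     "ChainOfThought": "Karmaşık, analitik veya açıklama gerektiren sorular. Adım adım düşünme gerektirir.",
--     "ReAct":          "Güncel bilgi, haber, banka işlemi veya araştırma gerektiren sorular.",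
--     "ProgramOfThought": "Matematik, hesaplama veya kod gerektiren sorular.",
--     "MultiChainComparison": "Karşılaştırma, eleştiri, avantaj/dezavantaj veya farklı bakış açısı isteyen sorular.",
--     "Summarize":      "Bir konuyu özetleme veya kısa açıklama isteyen sorular.",
--     "Predict":        "Basit, kısa ve doğrudan yanıt gerektiren olgusal sorular.",
-- }
--
--
-- def _fuzzy_match_mode(raw: str) -> str:
--     # Every mode name is a single word, so a word-level hit is already a
--     # substring hit: one bidirectional substring test per mode suffices.
--     rl = raw.lower()
--     return next(
--         (m for m in DSPY_MODES if m.lower() in rl or rl in m.lower()),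
--         "ChainOfThought",
--     )
-- ===== Notes on version B (the rewrite author's own statement) =====
-- stated objective: idiomatic
-- what changed: Collapses A's two sequential scans (early-return substring scan plus a word-by-word scan that is provably dead, since every mode name is a single word) into a single next() over a generator with the default, i.e. one find-first-match with default.
import Mathlib
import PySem

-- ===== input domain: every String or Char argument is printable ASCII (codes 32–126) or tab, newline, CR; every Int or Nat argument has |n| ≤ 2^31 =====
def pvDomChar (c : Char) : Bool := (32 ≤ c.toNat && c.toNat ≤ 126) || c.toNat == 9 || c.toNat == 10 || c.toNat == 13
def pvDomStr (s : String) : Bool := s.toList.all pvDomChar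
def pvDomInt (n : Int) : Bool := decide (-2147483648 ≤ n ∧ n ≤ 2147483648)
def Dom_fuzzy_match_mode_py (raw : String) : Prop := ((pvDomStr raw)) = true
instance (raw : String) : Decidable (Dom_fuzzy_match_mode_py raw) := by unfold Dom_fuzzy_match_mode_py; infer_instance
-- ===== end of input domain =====

-- B collapses A's two scans (the second is dead code: every mode name is one word)
-- into a single find-first-match with default (objective: idiomatic).

-- the keys of DSPY_MODES, in insertion order (shared constant of the module)
def pvModes : List String :=
  ["ChainOfThought", "ReAct", "ProgramOfThought", "MultiChainComparison", "Summarize", "Predict"]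

-- ===== PORT A =====
-- first loop: return the first mode with a bidirectional substring match
def pvALoop1 : List String → String → Option String
  | [], _ => none
  | m :: rest, rl =>
      if PySem.Str.isIn (PySem.Str.lower m) rl || PySem.Str.isIn rl (PySem.Str.lower m) then some m
      else pvALoop1 rest rl

-- inner loop of the second scan: any word of the mode name occurs in raw_lower
def pvAWords : List String → String → Bool
  | [], _ => false
  | w :: ws, rl => if PySem.Str.isIn w rl then true else pvAWords ws rl

-- second loop: return the first mode one of whose words occurs in raw_lower
def pvALoop2 : List String → String → Option String
  | [], _ => none
  | m :: rest, rl =>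
      if pvAWords (PySem.Str.split₀ (PySem.Str.lower m)) rl then some m
      else pvALoop2 rest rl

def fuzzy_match_mode_py (raw : String) : String :=
  let raw_lower := PySem.Str.lower raw
  match pvALoop1 pvModes raw_lower with
  | some m => m
  | none =>
      match pvALoop2 pvModes raw_lower with
      | some m => m
      | none => "ChainOfThought"

-- ===== PORT B =====
-- next((m for m in DSPY_MODES if m.lower() in rl or rl in m.lower()), "ChainOfThought")
def fuzzy_match_mode_py_alt (raw : String) : String :=
  let rl := PySem.Str.lower raw
  (pvModes.find? fun m =>
      PySem.Str.isIn (PySem.Str.lower m) rl || PySem.Str.isIn rl (PySem.Str.lower m)).getD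
    "ChainOfThought"

-- ===== PRECONDITION & SPEC =====
def Spec_fuzzy_match_mode_py (raw : String) (out : String) : Prop := out = fuzzy_match_mode_py_alt raw
instance (raw : String) (out : String) : Decidable (Spec_fuzzy_match_mode_py raw out) := by unfold Spec_fuzzy_match_mode_py; infer_instance

-- ===== CLAIM (what is proved, stated in full; the proofs are below) =====
def Claim_equal_fuzzy_match_mode_py : Prop := ∀ (raw : String), Dom_fuzzy_match_mode_py raw → Spec_fuzzy_match_mode_py raw (fuzzy_match_mode_py raw)

-- ===== LEMMAS AND PROOFS =====

-- the per-mode match test both programs apply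
def pvQ (rl m : String) : Bool :=
  PySem.Str.isIn (PySem.Str.lower m) rl || PySem.Str.isIn rl (PySem.Str.lower m)

lemma pv_alt_eq (raw : String) :
    fuzzy_match_mode_py_alt raw =
      (pvModes.find? (pvQ (PySem.Str.lower raw))).getD "ChainOfThought" := rfl

lemma pv_loop1_eq_find (l : List String) (rl : String) :
    pvALoop1 l rl = l.find? (pvQ rl) := by
  induction l with
  | nil => rfl
  | cons x xs ih =>
      simp only [pvALoop1, List.find?, pvQ]
      cases h : PySem.Str.isIn (PySem.Str.lower x) rl || PySem.Str.isIn rl (PySem.Str.lower x)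
      · simp [ih]
      · simp [h]

-- each mode name is a single word, so the word-scan test is the left half of pvQ
lemma pv_loop2_none (rl : String)
    (h : ∀ m ∈ pvModes, pvQ rl m = false) : pvALoop2 pvModes rl = none := by
  have h1 := h "ChainOfThought" (by decide)
  have h2 := h "ReAct" (by decide)
  have h3 := h "ProgramOfThought" (by decide)
  have h4 := h "MultiChainComparison" (by decide)
  have h5 := h "Summarize" (by decide)
  have h6 := h "Predict" (by decide)
  simp only [pvQ, Bool.or_eq_false_iff] at h1 h2 h3 h4 h5 h6
  have e1 : PySem.Str.split₀ (PySem.Str.lower "ChainOfThought") = [PySem.Str.lower "ChainOfThought"] := by decide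
  have e2 : PySem.Str.split₀ (PySem.Str.lower "ReAct") = [PySem.Str.lower "ReAct"] := by decide
  have e3 : PySem.Str.split₀ (PySem.Str.lower "ProgramOfThought") = [PySem.Str.lower "ProgramOfThought"] := by decide
  have e4 : PySem.Str.split₀ (PySem.Str.lower "MultiChainComparison") = [PySem.Str.lower "MultiChainComparison"] := by decide
  have e5 : PySem.Str.split₀ (PySem.Str.lower "Summarize") = [PySem.Str.lower "Summarize"] := by decide
  have e6 : PySem.Str.split₀ (PySem.Str.lower "Predict") = [PySem.Str.lower "Predict"] := by decide
  simp only [pvModes, pvALoop2, e1, e2, e3, e4, e5, e6, pvAWords,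
             h1.1, h2.1, h3.1, h4.1, h5.1, h6.1]
  rfl

lemma pvA_unfold (raw : String) :
    fuzzy_match_mode_py raw =
      (match pvALoop1 pvModes (PySem.Str.lower raw) with
       | some m => m
       | none =>
           match pvALoop2 pvModes (PySem.Str.lower raw) with
           | some m => m
           | none => "ChainOfThought") := rfl

-- ===== VERDICT (by name: the statement is the Claim_ definition above) =====
theorem fuzzy_match_mode_py_spec : Claim_equal_fuzzy_match_mode_py := by
  intro raw _
  unfold Spec_fuzzy_match_mode_py
  rw [pv_alt_eq]
  rw [pvA_unfold, pv_loop1_eq_find]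
  cases hf : pvModes.find? (pvQ (PySem.Str.lower raw)) with
  | some m => simp
  | none =>
      have hall : ∀ m ∈ pvModes, pvQ (PySem.Str.lower raw) m = false := by
        intro m hm
        exact Bool.eq_false_iff.mpr (List.find?_eq_none.mp hf m hm)
      rw [pv_loop2_none _ hall]
      simp
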